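-- pv_equiv track=rewrite | github.com/lan3344/lan-learns | AI日记本/插件/lan_recall.py | _judge_trend
-- ===== SOURCE A (Python) =====
-- from typing import List, Dict, Tuple, Optional
--
-- def _judge_trend(diff: List[Dict]) -> str:
--     """判断趋势"""
--     added = sum(1 for d in diff if d["type"] == "added")
--     removed = sum(1 for d in diff if d["type"] == "removed")
--
--     if added > removed:
--         return "improved"
--     elif removed > added:
--         return "regressed"
--     else:
--         return "stable"
-- ===== SOURCE B (Python) =====
-- from typing import List, Dict
--
-- def _judge_trend(diff: List[Dict]) -> str:
--     """Single pass keeping one signed balance instead of two separate counts."""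
--     net = 0
--     for d in diff:
--         t = d["type"]
--         if t == "added":
--             net += 1
--         elif t == "removed":
--             net -= 1
--     return "improved" if net > 0 else "regressed" if net < 0 else "stable"
-- ===== Notes on version B (the rewrite author's own statement) =====
-- stated objective: simpler
-- what changed: Replaces A's two independent generator-sum passes over the list with a single loop maintaining one signed net balance (+1 for 'added', -1 for 'removed') and classifying its sign.
import Mathlib
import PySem

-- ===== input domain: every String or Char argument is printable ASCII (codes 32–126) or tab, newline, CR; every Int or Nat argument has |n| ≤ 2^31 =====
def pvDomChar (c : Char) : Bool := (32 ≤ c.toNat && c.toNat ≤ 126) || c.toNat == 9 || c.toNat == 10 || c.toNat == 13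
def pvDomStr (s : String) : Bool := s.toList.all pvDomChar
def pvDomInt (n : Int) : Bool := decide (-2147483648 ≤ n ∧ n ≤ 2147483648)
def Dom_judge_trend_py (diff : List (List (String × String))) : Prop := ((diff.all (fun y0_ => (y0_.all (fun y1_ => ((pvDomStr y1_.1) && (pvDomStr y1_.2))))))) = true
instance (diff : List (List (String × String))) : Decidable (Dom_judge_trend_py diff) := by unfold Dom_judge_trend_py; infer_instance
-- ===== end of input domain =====

-- B replaces A's two separate counting passes with one single-pass signed balance; return-value equivalence on inputs where every entry has a "type" key.

-- ===== PORT A =====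
-- d["type"]: first-match lookup in the association list (dict convention)
def pvTypeOf (d : List (String × String)) : Option String :=
  (d.find? (fun p => p.1 == "type")).map (·.2)

def judge_trend_py (diff : List (List (String × String))) : String :=
  let added := diff.foldl (fun acc d => if pvTypeOf d == some "added" then acc + 1 else acc) (0 : Int)
  let removed := diff.foldl (fun acc d => if pvTypeOf d == some "removed" then acc + 1 else acc) (0 : Int)
  if added > removed then "improved"
  else if removed > added then "regressed"
  else "stable"

-- ===== PORT B =====
def judge_trend_py_alt (diff : List (List (String × String))) : String :=
  let net := diff.foldl (fun acc d =>
    match pvTypeOf d with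
    | some "added" => acc + 1
    | some "removed" => acc - 1
    | _ => acc) (0 : Int)
  if net > 0 then "improved"
  else if net < 0 then "regressed"
  else "stable"

-- ===== PRECONDITION & SPEC =====
-- Pre_ excludes exactly the inputs where Python's d["type"] raises KeyError (an entry without a "type" key); both A and B raise there.
def Pre_judge_trend_py (diff : List (List (String × String))) : Prop :=
  (diff.all (fun d => d.any (fun p => p.1 == "type"))) = true
instance (diff : List (List (String × String))) : Decidable (Pre_judge_trend_py diff) := by unfold Pre_judge_trend_py; infer_instance
def pvWitness_judge_trend_py : (List (List (String × String))) := [[("type", "added")], [("type", "other")]]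

def Spec_judge_trend_py (diff : List (List (String × String))) (out : String) : Prop := out = judge_trend_py_alt diff
instance (diff : List (List (String × String))) (out : String) : Decidable (Spec_judge_trend_py diff out) := by unfold Spec_judge_trend_py; infer_instance

-- ===== CLAIM (what is proved, stated in full; the proofs are below) =====
def Claim_equal_judge_trend_py : Prop := ∀ (diff : List (List (String × String))), Dom_judge_trend_py diff → Pre_judge_trend_py diff → Spec_judge_trend_py diff (judge_trend_py diff)

-- ===== LEMMAS AND PROOFS =====

-- B's single fold equals the difference of A's two folds, for arbitrary accumulators.
lemma net_eq_added_sub_removed (diff : List (List (String × String))) :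
    ∀ (a r : Int),
      diff.foldl (fun acc d =>
        match pvTypeOf d with
        | some "added" => acc + 1
        | some "removed" => acc - 1
        | _ => acc) (a - r)
      = diff.foldl (fun acc d => if pvTypeOf d == some "added" then acc + 1 else acc) a
        - diff.foldl (fun acc d => if pvTypeOf d == some "removed" then acc + 1 else acc) r := by
  induction diff with
  | nil => intro a r; simp
  | cons d rest ih =>
    intro a r
    simp only [List.foldl_cons]
    cases h : pvTypeOf d with
    | none => simpa [h] using ih a r
    | some s =>
      by_cases hs : s = "added"
      · subst hs
        rw [show a - r + 1 = a + 1 - r by ring]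
        simpa [h] using ih (a + 1) r
      · by_cases hr : s = "removed"
        · subst hr
          have : a - r - 1 = a - (r + 1) := by ring
          simpa [h, this] using ih a (r + 1)
        · have hm : (match some s with
              | some "added" => a - r + 1
              | some "removed" => a - r - 1
              | _ => a - r) = a - r := by
            split
            · rename_i heq; injection heq with heq; exact absurd heq hs
            · rename_i heq; injection heq with heq; exact absurd heq hr
            · rfl
          have h1 : (some s == some "added") = false := by simp [hs]
          have h2 : (some s == some "removed") = false := by simp [hr]
          simp only [hm, h1, h2, Bool.false_eq_true, if_false]
          exact ih a r

-- ===== VERDICT (by name: the statement is the Claim_ definition above) =====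
theorem judge_trend_py_spec : Claim_equal_judge_trend_py := by
  intro diff _ _
  unfold Spec_judge_trend_py judge_trend_py judge_trend_py_alt
  have h := net_eq_added_sub_removed diff 0 0
  simp only [sub_zero] at h
  simp only [h]
  set a := diff.foldl (fun acc d => if pvTypeOf d == some "added" then acc + 1 else acc) (0 : Int)
  set r := diff.foldl (fun acc d => if pvTypeOf d == some "removed" then acc + 1 else acc) (0 : Int)
  by_cases h1 : a > r
  · simp [h1]
  · by_cases h2 : r > a
    · simp [h1, h2, show a - r < 0 by omega]
    · simp [h1, h2, show ¬(a - r < 0) by omega]
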